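-- pv_equiv track=rewrite | github.com/ShadmanSakibShuvo/_Academics_ | CSE 221 (Algorithm)/Fall23/Lab 3/Task 4.py | msquared
-- ===== SOURCE A (Python) =====
-- def msquared(arr):
--     if len(arr)==1:
--         return arr[0]  #as 1 <= i < j <= N
--     mid=len(arr)//2
--     left=arr[:mid]
--     right=arr[mid:]
--     ml=msquared(left)
--     mr=msquared(right)
--     mc1=max(left)+max(right)**2
--     mc2=max(left)+min(right)**2
--     if(mc1>mc2):
--       mc=mc1
--     else:
--       mc=mc2
--     if ml>mr and ml>mc:
--       return ml
--     elif mr>ml and mr>mc: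
--       return mr
--     else:
--       return mc
-- ===== SOURCE B (Python) =====
-- def msquared(arr):
--     # One recursion over index ranges returning (result, segment max, segment min):
--     # no list slicing and no separate max()/min() scans per node.
--     def go(lo, n):
--         if n == 1:
--             x = arr[lo]
--             return x, x, x
--         m = n // 2
--         ml, maxl, minl = go(lo, m)
--         mr, maxr, minr = go(lo + m, n - m)
--         sq = maxr * maxr
--         sq2 = minr * minr
--         mc = maxl + (sq if sq > sq2 else sq2)
--         if ml > mr and ml > mc:
--             res = ml
--         elif mr > ml and mr > mc:
--             res = mr
--         else:
--             res = mc
--         return res, (maxl if maxl > maxr else maxr), (minl if minl < minr else minr)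
--     return go(0, len(arr))[0]
-- ===== Notes on version B (the rewrite author's own statement) =====
-- stated objective: faster
-- what changed: B replaces A's recursion on list slices with per-node max()/min() scans by a single index-based recursion that returns (result, segment max, segment min), eliminating all slicing and all inner extrema scans.
import Mathlib
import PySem

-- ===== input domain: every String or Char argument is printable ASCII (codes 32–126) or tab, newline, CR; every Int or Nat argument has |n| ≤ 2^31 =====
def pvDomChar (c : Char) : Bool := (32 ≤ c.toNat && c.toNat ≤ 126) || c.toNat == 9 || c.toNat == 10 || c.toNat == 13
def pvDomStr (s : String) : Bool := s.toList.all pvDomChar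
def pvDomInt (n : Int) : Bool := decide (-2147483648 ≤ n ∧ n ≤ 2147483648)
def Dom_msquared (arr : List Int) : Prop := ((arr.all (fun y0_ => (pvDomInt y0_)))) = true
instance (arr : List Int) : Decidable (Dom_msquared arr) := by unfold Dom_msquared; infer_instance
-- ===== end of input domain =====

-- B reproduces A's exact divide-and-conquer result via one index-based recursion returning
-- (result, max, min), removing A's slicing and per-node max/min scans (objective: faster).


-- ===== PORT A =====
-- literal transliteration of A: recursion on slices, max()/min() scans per node.
-- max(left)/min(right) are ported with PySem.List.max?/min? (exact: the lists are nonempty here).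
def msquared (arr : List Int) : Int :=
  if arr.length = 1 then (PySem.List.pyGet? arr 0).getD 0
  else if _h0 : arr.length < 2 then 0   -- length 0: the Python recurses forever; excluded by Pre_
  else
    let mid := arr.length / 2
    let left := PySem.List.slice arr none (some (mid : Int))
    let right := PySem.List.slice arr (some (mid : Int)) none
    let ml := msquared left
    let mr := msquared right
    let mc1 := (PySem.List.max? left (fun y => y)).getD 0 + ((PySem.List.max? right (fun y => y)).getD 0) ^ 2
    let mc2 := (PySem.List.max? left (fun y => y)).getD 0 + ((PySem.List.min? right (fun y => y)).getD 0) ^ 2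
    let mc := if mc1 > mc2 then mc1 else mc2
    if ml > mr ∧ ml > mc then ml
    else if mr > ml ∧ mr > mc then mr
    else mc
termination_by arr.length
decreasing_by
  · simp only [PySem.List.slice_to_natCast, List.length_take]; omega
  · simp only [PySem.List.slice_from_natCast, List.length_drop]; omega

-- ===== PORT B =====
-- helper go(lo, n) of Source B: one recursion over index ranges, returns (result, max, min)
def msqGo (arr : List Int) (lo n : Nat) : Int × Int × Int :=
  if n = 1 then
    let x := (PySem.List.pyGet? arr (lo : Int)).getD 0
    (x, x, x)
  else if _h0 : n = 0 then (0, 0, 0)   -- n = 0: the Python recurses forever; excluded by Pre_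
  else
    let m := n / 2
    let l := msqGo arr lo m
    let r := msqGo arr (lo + m) (n - m)
    let sq := r.2.1 * r.2.1
    let sq2 := r.2.2 * r.2.2
    let mc := l.2.1 + (if sq > sq2 then sq else sq2)
    let res := if l.1 > r.1 ∧ l.1 > mc then l.1
               else if r.1 > l.1 ∧ r.1 > mc then r.1
               else mc
    (res, if l.2.1 > r.2.1 then l.2.1 else r.2.1, if l.2.2 < r.2.2 then l.2.2 else r.2.2)
termination_by n
decreasing_by all_goals omega

def msquared_alt (arr : List Int) : Int := (msqGo arr 0 arr.length).1

-- ===== PRECONDITION & SPEC =====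
-- Pre_ excludes only the empty list, on which A recurses forever (RecursionError).
def Pre_msquared (arr : List Int) : Prop := arr ≠ []
instance (arr : List Int) : Decidable (Pre_msquared arr) := by unfold Pre_msquared; infer_instance
def pvWitness_msquared : List Int := ([1, 2] : List Int)

def Spec_msquared (arr : List Int) (out : Int) : Prop := out = msquared_alt arr
instance (arr : List Int) (out : Int) : Decidable (Spec_msquared arr out) := by unfold Spec_msquared; infer_instance

-- ===== CLAIM (what is proved, stated in full; the proofs are below) =====
def Claim_equal_msquared : Prop := ∀ (arr : List Int), Dom_msquared arr → Pre_msquared arr → Spec_msquared arr (msquared arr)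

-- ===== LEMMAS AND PROOFS =====
def segMax (xs : List Int) : Int := (PySem.List.max? xs (fun y => y)).getD 0
def segMin (xs : List Int) : Int := (PySem.List.min? xs (fun y => y)).getD 0

lemma foldl_max_comm (s : List Int) : ∀ a y : Int, s.foldl max (max a y) = max a (s.foldl max y) := by
  induction s with
  | nil => intro a y; simp
  | cons z s ih =>
      intro a y
      simp only [List.foldl_cons]
      rw [max_assoc, ih]

lemma foldl_min_comm (s : List Int) : ∀ a y : Int, s.foldl min (min a y) = min a (s.foldl min y) := by
  induction s with
  | nil => intro a y; simp
  | cons z s ih =>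
      intro a y
      simp only [List.foldl_cons]
      rw [min_assoc, ih]

lemma segMax_append (l r : List Int) (hl : l ≠ []) (hr : r ≠ []) :
    segMax (l ++ r) = max (segMax l) (segMax r) := by
  obtain ⟨x, t, rfl⟩ := List.exists_cons_of_ne_nil hl
  obtain ⟨y, s, rfl⟩ := List.exists_cons_of_ne_nil hr
  simp only [segMax, List.cons_append, PySem.List.max?_id_cons, Option.getD_some,
    List.foldl_append, List.foldl_cons]
  exact foldl_max_comm s _ y

lemma segMin_append (l r : List Int) (hl : l ≠ []) (hr : r ≠ []) :
    segMin (l ++ r) = min (segMin l) (segMin r) := by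
  obtain ⟨x, t, rfl⟩ := List.exists_cons_of_ne_nil hl
  obtain ⟨y, s, rfl⟩ := List.exists_cons_of_ne_nil hr
  simp only [segMin, List.cons_append, PySem.List.min?_id_cons, Option.getD_some,
    List.foldl_append, List.foldl_cons]
  exact foldl_min_comm s _ y

-- A's combine step (mc1/mc2 and the three-way branch), abstracted to keep proof terms small
def combineA (ml mr gl gr lr : Int) : Int :=
  let mc1 := gl + gr ^ 2
  let mc2 := gl + lr ^ 2
  let mc := if mc1 > mc2 then mc1 else mc2
  if ml > mr ∧ ml > mc then ml else if mr > ml ∧ mr > mc then mr else mc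

-- B's combine step on triples
def combineB (l r : Int × Int × Int) : Int × Int × Int :=
  let sq := r.2.1 * r.2.1
  let sq2 := r.2.2 * r.2.2
  let mc := l.2.1 + (if sq > sq2 then sq else sq2)
  let res := if l.1 > r.1 ∧ l.1 > mc then l.1
             else if r.1 > l.1 ∧ r.1 > mc then r.1
             else mc
  (res, if l.2.1 > r.2.1 then l.2.1 else r.2.1, if l.2.2 < r.2.2 then l.2.2 else r.2.2)

lemma msquared_step (xs : List Int) (h2 : 2 ≤ xs.length) :
    msquared xs = combineA (msquared (xs.take (xs.length / 2))) (msquared (xs.drop (xs.length / 2)))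
      (segMax (xs.take (xs.length / 2))) (segMax (xs.drop (xs.length / 2)))
      (segMin (xs.drop (xs.length / 2))) := by
  conv_lhs => rw [msquared]
  rw [if_neg (by omega), dif_neg (by omega)]
  simp only [PySem.List.slice_to_natCast, PySem.List.slice_from_natCast]
  rfl

lemma msqGo_step (arr : List Int) (lo n : Nat) (h2 : 2 ≤ n) :
    msqGo arr lo n = combineB (msqGo arr lo (n / 2)) (msqGo arr (lo + n / 2) (n - n / 2)) := by
  rw [msqGo]
  rw [if_neg (by omega), dif_neg (by omega)]
  rfl

lemma combine_eq (a d gl lr gr mr : Int) :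
    combineB (a, gl, lr) (d, gr, mr) =
      (combineA a d gl gr mr, if gl > gr then gl else gr, if lr < mr then lr else mr) := by
  have h : gl + (if gr * gr > mr * mr then gr * gr else mr * mr)
      = (if gl + gr ^ 2 > gl + mr ^ 2 then gl + gr ^ 2 else gl + mr ^ 2) := by
    rw [pow_two, pow_two]
    generalize gr * gr = P
    generalize mr * mr = Q
    split_ifs <;> omega
  simp only [combineB, combineA, h]

lemma segMax_eq_max (xs : List Int) (a b : Int) (h : segMax xs = max a b) :
    segMax xs = if a > b then a else b := by
  rw [h]; split_ifs <;> omega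

lemma segMin_eq_min (xs : List Int) (a b : Int) (h : segMin xs = min a b) :
    segMin xs = if a < b then a else b := by
  rw [h]; split_ifs <;> omega

lemma go_eq (arr : List Int) : ∀ n lo : Nat, 1 ≤ n → lo + n ≤ arr.length →
    msqGo arr lo n =
      (msquared ((arr.drop lo).take n), segMax ((arr.drop lo).take n), segMin ((arr.drop lo).take n)) := by
  intro n
  induction n using Nat.strong_induction_on with
  | _ n ih =>
    intro lo h1 hle
    by_cases hn1 : n = 1
    · subst hn1
      have hlt : lo < arr.length := by omega
      have hseg : (arr.drop lo).take 1 = [arr[lo]] := by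
        rw [List.drop_eq_getElem_cons hlt]; rfl
      rw [msqGo, hseg]
      rw [msquared]
      simp [segMax, segMin, PySem.List.max?_id_cons, PySem.List.min?_id_cons,
        PySem.List.pyGet?_natCast, List.getElem?_eq_getElem hlt]
    · -- n ≥ 2
      set seg := (arr.drop lo).take n with hsegdef
      have hlen : seg.length = n := by
        simp only [hsegdef, List.length_take, List.length_drop]; omega
      set m := n / 2 with hm
      have hm1 : 1 ≤ m := by omega
      have hmn : m < n := by omega
      have hsegl : seg.take m = (arr.drop lo).take m := by
        rw [hsegdef, List.take_take]
        try congr 1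
        all_goals omega
      have hsegr : seg.drop m = (arr.drop (lo + m)).take (n - m) := by
        rw [hsegdef, List.drop_take, List.drop_drop]
      have hlnil : seg.take m ≠ [] := by
        intro h; have := congrArg List.length h; simp [hlen] at this; omega
      have hrnil : seg.drop m ≠ [] := by
        intro h; have := congrArg List.length h; simp [hlen] at this; omega
      have ihl := ih m hmn lo hm1 (by omega)
      have ihr := ih (n - m) (by omega) (lo + m) (by omega) (by omega)
      rw [← hsegl] at ihl
      rw [← hsegr] at ihr
      have hmaxs : segMax seg = max (segMax (seg.take m)) (segMax (seg.drop m)) := by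
        conv_lhs => rw [show seg = seg.take m ++ seg.drop m from (List.take_append_drop m seg).symm]
        exact segMax_append _ _ hlnil hrnil
      have hmins : segMin seg = min (segMin (seg.take m)) (segMin (seg.drop m)) := by
        conv_lhs => rw [show seg = seg.take m ++ seg.drop m from (List.take_append_drop m seg).symm]
        exact segMin_append _ _ hlnil hrnil
      have hstepA := msquared_step seg (by omega)
      rw [hlen, ← hm] at hstepA
      have hstepB := msqGo_step arr lo n (by omega)
      rw [← hm] at hstepB
      rw [hstepB, ihl, ihr, combine_eq, hstepA,
        segMax_eq_max seg _ _ hmaxs, segMin_eq_min seg _ _ hmins]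
-- ===== VERDICT (by name: the statement is the Claim_ definition above) =====
theorem msquared_spec : Claim_equal_msquared := by
  intro arr _ hpre
  have h1 : 1 ≤ arr.length := by
    cases arr with
    | nil => exact absurd rfl hpre
    | cons x t => simp
  have := go_eq arr arr.length 0 h1 (by omega)
  unfold Spec_msquared msquared_alt
  rw [this]
  simp
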